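-- pv_equiv track=rewrite | github.com/smjaques/Python | 101/project3/solverFuncs.py | check_rows_valid
-- ===== SOURCE A (Python) =====
-- def check_row_valid(puzzle):
--    x = 1
--    list = []
--    while x < 6:
--       count = puzzle.count(x)
--       x += 1
--       list.append(count)
--    if all(i < 2 for i in list):
--       return True
--    else:
--       return False
--
-- def check_rows_valid(puzzle):
--    list1 = []
--    for i in puzzle:
--       x = (check_row_valid(i))
--       list1.append(x)
--    if all(y == True for y in list1):
--       return True
--    else:
--       return False
-- ===== SOURCE B (Python) =====
-- def check_rows_valid(puzzle):
--     def row_ok(row):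
--         seen = set()
--         for v in row:
--             if 1 <= v <= 5:
--                 if v in seen:
--                     return False
--                 seen.add(v)
--         return True
--     return all(row_ok(row) for row in puzzle)
-- ===== Notes on version B (the rewrite author's own statement) =====
-- stated objective: idiomatic
-- what changed: Replaces the five per-value .count scans and the intermediate count/result lists with a single pass per row maintaining a set of seen values in 1..5, short-circuiting via all().
import Mathlib
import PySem

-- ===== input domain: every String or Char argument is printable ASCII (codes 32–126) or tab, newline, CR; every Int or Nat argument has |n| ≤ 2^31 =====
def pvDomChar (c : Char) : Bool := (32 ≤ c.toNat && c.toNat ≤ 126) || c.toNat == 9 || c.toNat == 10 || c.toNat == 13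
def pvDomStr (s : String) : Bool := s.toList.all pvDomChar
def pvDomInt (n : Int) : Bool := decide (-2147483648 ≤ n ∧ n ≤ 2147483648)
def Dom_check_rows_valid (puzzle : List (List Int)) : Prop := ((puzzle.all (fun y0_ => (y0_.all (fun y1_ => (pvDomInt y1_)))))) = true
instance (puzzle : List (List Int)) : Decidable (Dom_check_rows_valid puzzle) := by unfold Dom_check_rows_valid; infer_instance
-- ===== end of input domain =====

-- B replaces five per-value .count scans per row with one pass keeping a set of seen values in 1..5 (idiomatic).
-- ===== PORT A =====
-- while x < 6: count = puzzle.count(x); x += 1; list.append(count)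
def crvLoop (puzzle : List Int) (x : Int) (acc : List Int) : List Int :=
  if x < 6 then crvLoop puzzle (x + 1) (acc ++ [(PySem.List.count puzzle x : Int)]) else acc
  termination_by (6 - x).toNat
  decreasing_by omega

def check_row_valid (puzzle : List Int) : Bool :=
  let list := crvLoop puzzle 1 []
  -- if all(i < 2 for i in list): return True else: return False
  if list.all (fun i => i < 2) then true else false

def check_rows_valid (puzzle : List (List Int)) : Bool :=
  let list1 := puzzle.foldl (fun acc i => acc ++ [check_row_valid i]) []
  if list1.all (fun y => y == true) then true else false

-- ===== PORT B =====
def rowOkGo (row : List Int) (seen : PySem.Set Int) : Bool :=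
  match row with
  | [] => true
  | v :: rest =>
    if 1 ≤ v ∧ v ≤ 5 then
      if PySem.Set.contains seen v then false
      else rowOkGo rest (PySem.Set.add seen v)
    else rowOkGo rest seen

def check_rows_valid_alt (puzzle : List (List Int)) : Bool :=
  puzzle.all (fun row => rowOkGo row PySem.Set.empty)

-- ===== PRECONDITION & SPEC =====
def Spec_check_rows_valid (puzzle : List (List Int)) (out : Bool) : Prop := out = check_rows_valid_alt puzzle
instance (puzzle : List (List Int)) (out : Bool) : Decidable (Spec_check_rows_valid puzzle out) := by unfold Spec_check_rows_valid; infer_instance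

-- ===== CLAIM (what is proved, stated in full; the proofs are below) =====
def Claim_equal_check_rows_valid : Prop := ∀ (puzzle : List (List Int)), Dom_check_rows_valid puzzle → Spec_check_rows_valid puzzle (check_rows_valid puzzle)

-- ===== LEMMAS AND PROOFS =====

-- B's row scan, characterised: counting occurrences plus what is already in `seen`.
lemma rowOkGo_iff (row : List Int) (seen : PySem.Set Int) :
    rowOkGo row seen = true ↔
      ∀ v : Int, 1 ≤ v → v ≤ 5 →
        (row.count v : Int) + (if v ∈ seen then 1 else 0) < 2 := by
  induction row generalizing seen with
  | nil =>
    simp only [rowOkGo, List.count_nil, Nat.cast_zero, zero_add, true_iff]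
    intro v _ _
    split_ifs <;> norm_num
  | cons a rest ih =>
    by_cases hr : 1 ≤ a ∧ a ≤ 5
    · by_cases hc : a ∈ seen
      · have hgo : rowOkGo (a :: rest) seen = false := by
          simp [rowOkGo, hr, PySem.Set.contains, hc]
        rw [hgo]
        simp only [Bool.false_eq_true, false_iff, not_forall]
        refine ⟨a, hr.1, hr.2, ?_⟩
        rw [if_pos hc, List.count_cons_self]
        push_cast
        omega
      · have hgo : rowOkGo (a :: rest) seen = rowOkGo rest (PySem.Set.add seen a) := by
          simp [rowOkGo, hr, PySem.Set.contains, hc]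
        have hmem : ∀ v : Int, (v ∈ PySem.Set.add seen a) ↔ (v = a ∨ v ∈ seen) := by
          intro v
          simp [PySem.Set.add, PySem.Set.contains, hc, or_comm]
        rw [hgo, ih]
        refine forall_congr' fun v => imp_congr_right fun h1 => imp_congr_right fun h5 => ?_
        by_cases hv : v = a
        · subst hv
          rw [List.count_cons_self]
          simp only [hmem, true_or, if_pos, if_neg hc]
          push_cast
          omega
        · simp [hmem, hv, List.count_cons, show ¬ a = v from fun h => hv h.symm]
    · have hgo : rowOkGo (a :: rest) seen = rowOkGo rest seen := by
        simp [rowOkGo, hr]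
      rw [hgo, ih]
      refine forall_congr' fun v => imp_congr_right fun h1 => imp_congr_right fun h5 => ?_
      have hva : v ≠ a := by rintro rfl; exact hr ⟨h1, h5⟩
      simp [List.count_cons, show ¬ a = v from fun h => hva h.symm]

lemma crvLoop_one (p : List Int) :
    crvLoop p 1 [] = [(PySem.List.count p 1 : Int), PySem.List.count p 2,
      PySem.List.count p 3, PySem.List.count p 4, PySem.List.count p 5] := by
  rw [crvLoop]; norm_num
  rw [crvLoop]; norm_num
  rw [crvLoop]; norm_num
  rw [crvLoop]; norm_num
  rw [crvLoop]; norm_num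
  rw [crvLoop]; norm_num

lemma count_lt_two_iff (p : List Int) :
    (∀ v : Int, 1 ≤ v → v ≤ 5 → (p.count v : Int) < 2) ↔
      ((p.count 1 : Int) < 2 ∧ (p.count 2 : Int) < 2 ∧ (p.count 3 : Int) < 2 ∧
        (p.count 4 : Int) < 2 ∧ (p.count 5 : Int) < 2) := by
  constructor
  · intro h
    exact ⟨h 1 (by norm_num) (by norm_num), h 2 (by norm_num) (by norm_num),
      h 3 (by norm_num) (by norm_num), h 4 (by norm_num) (by norm_num),
      h 5 (by norm_num) (by norm_num)⟩
  · rintro ⟨h1, h2, h3, h4, h5⟩ v hl hu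
    have hv : v = 1 ∨ v = 2 ∨ v = 3 ∨ v = 4 ∨ v = 5 := by omega
    rcases hv with rfl | rfl | rfl | rfl | rfl <;> assumption

lemma row_eq (p : List Int) : check_row_valid p = rowOkGo p PySem.Set.empty := by
  have hiff := rowOkGo_iff p PySem.Set.empty
  have hiff' : rowOkGo p PySem.Set.empty = true ↔
      ∀ v : Int, 1 ≤ v → v ≤ 5 → (p.count v : Int) < 2 := by
    rw [hiff]
    refine forall_congr' fun v => imp_congr_right fun h1 => imp_congr_right fun h5 => ?_
    simp [PySem.Set.empty]
  simp only [check_row_valid, crvLoop_one, List.all_cons, List.all_nil, Bool.and_true,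
    PySem.List.count_eq]
  rcases Bool.eq_false_or_eq_true (rowOkGo p PySem.Set.empty) with hb | hb
  · rw [hb]
    have h := hiff'.mp hb
    rw [if_pos]
    rw [count_lt_two_iff] at h
    simp only [Bool.and_eq_true, decide_eq_true_eq]
    exact ⟨h.1, h.2.1, h.2.2.1, h.2.2.2.1, h.2.2.2.2⟩
  · rw [hb]
    rw [if_neg]
    intro hall
    simp only [Bool.and_eq_true, decide_eq_true_eq] at hall
    have ht : rowOkGo p PySem.Set.empty = true :=
      hiff'.mpr ((count_lt_two_iff p).mpr
        ⟨hall.1, hall.2.1, hall.2.2.1, hall.2.2.2.1, hall.2.2.2.2⟩)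
    rw [hb] at ht
    exact Bool.false_ne_true ht

lemma all_rows_eq (l : List (List Int)) :
    (l.map check_row_valid).all (fun y => y == true)
      = l.all (fun row => rowOkGo row PySem.Set.empty) := by
  induction l with
  | nil => rfl
  | cons r t ih =>
    simp only [List.map_cons, List.all_cons, row_eq, ih]
    cases rowOkGo r PySem.Set.empty <;> simp

lemma foldl_append_singleton (l : List (List Int)) (acc : List Bool) :
    l.foldl (fun acc i => acc ++ [check_row_valid i]) acc = acc ++ l.map check_row_valid := by
  induction l generalizing acc with
  | nil => simp
  | cons a t ih => simp [List.foldl_cons, ih]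

-- ===== VERDICT (by name: the statement is the Claim_ definition above) =====
theorem check_rows_valid_spec : Claim_equal_check_rows_valid := by
  intro puzzle _
  unfold Spec_check_rows_valid
  simp only [check_rows_valid, check_rows_valid_alt, foldl_append_singleton, List.nil_append]
  rw [all_rows_eq]
  split_ifs with h
  · exact h.symm
  · exact ((Bool.not_eq_true _).mp fun hh => h hh).symm
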